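-- pv_equiv track=rewrite | github.com/karl-odie/portfolio | portfolio/fitness/serializers.py | elevation_gain
-- ===== SOURCE A (Python) =====
-- def elevation_gain(points):
--     gain = 0
--     last_elevation = None
--     points_up = 0
--     must_raise = 2
--     for point in points:
--         if last_elevation is not None and point["altitude"] > last_elevation:
--             if points_up < must_raise:
--                 points_up += 1
--             else:
--                 gain += int(point["altitude"]) - int(last_elevation)
--         else:
--             points_up = 0
--         last_elevation = point["altitude"]
--     return gain
-- ===== SOURCE B (Python) =====
-- def elevation_gain(points):
--     # Partition into maximal strictly-ascending runs, then credit each run's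
--     # transitions after the first two.
--     runs = []
--     cur = []
--     for p in points:
--         if cur and p["altitude"] > cur[-1]["altitude"]:
--             cur.append(p)
--         else:
--             if cur:
--                 runs.append(cur)
--             cur = [p]
--     if cur:
--         runs.append(cur)
--     total = 0
--     for run in runs:
--         climb = run[2:]
--         for prev, q in zip(climb, climb[1:]):
--             total += int(q["altitude"]) - int(prev["altitude"])
--     return total
-- ===== Notes on version B (the rewrite author's own statement) =====
-- stated objective: alternative
-- what changed: Replaces A's single pass with a streak counter by a two-phase decomposition: first materialize the maximal strictly-ascending runs of points, then sum each run's altitude differences after its first two transitions.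
import Mathlib
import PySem

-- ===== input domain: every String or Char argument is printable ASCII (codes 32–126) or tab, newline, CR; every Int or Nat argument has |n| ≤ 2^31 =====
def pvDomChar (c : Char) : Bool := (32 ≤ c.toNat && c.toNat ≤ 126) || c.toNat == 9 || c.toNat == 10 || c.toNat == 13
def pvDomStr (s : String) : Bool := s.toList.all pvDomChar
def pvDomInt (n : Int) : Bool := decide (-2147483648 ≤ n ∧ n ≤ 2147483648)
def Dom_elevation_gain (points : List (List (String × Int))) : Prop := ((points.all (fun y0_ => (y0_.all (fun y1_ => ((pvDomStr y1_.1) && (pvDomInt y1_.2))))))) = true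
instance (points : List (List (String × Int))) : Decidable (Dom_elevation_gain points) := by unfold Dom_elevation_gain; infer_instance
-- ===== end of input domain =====

-- B partitions the points into maximal strictly-ascending runs and sums, per run, the
-- altitude differences after the first two transitions; same result as A's streak counter
-- (objective: alternative decomposition, same cost). Pre_ excludes points without an
-- "altitude" key, where Python A raises KeyError.

-- shared helper: point["altitude"] (first-match association-list lookup; total form, used under Pre_)
def pvAlt (point : List (String × Int)) : Int := (point.lookup "altitude").getD 0

-- ===== PORT A =====
def pvStepA (s : Int × Option Int × Int) (point : List (String × Int)) : Int × Option Int × Int :=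
  match s with
  | (gain, last, pointsUp) =>
    match last with
    | some l =>
      if pvAlt point > l then
        if pointsUp < 2 then (gain, some (pvAlt point), pointsUp + 1)
        else (gain + (pvAlt point - l), some (pvAlt point), pointsUp)
      else (gain, some (pvAlt point), 0)
    | none => (gain, some (pvAlt point), 0)

def elevation_gain (points : List (List (String × Int))) : Int :=
  (points.foldl pvStepA (0, none, 0)).1

-- ===== PORT B =====
-- one step of the run-building loop: extend the current strictly-ascending run or close it
def pvRunStep (s : List (List (List (String × Int))) × List (List (String × Int)))
    (p : List (String × Int)) : List (List (List (String × Int))) × List (List (String × Int)) :=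
  match s with
  | (runs, cur) =>
    match cur.getLast? with
    | some lastPt =>
      if pvAlt p > pvAlt lastPt then (runs, cur ++ [p]) else (runs ++ [cur], [p])
    | none => (runs, [p])

-- gain of one run: differences along climb = run[2:], i.e. transitions after the first two
def pvRunGain (run : List (List (String × Int))) : Int :=
  let climb := PySem.List.slice run (some 2) none
  ((climb.zip (PySem.List.slice climb (some 1) none)).foldl
    (fun acc pq => acc + (pvAlt pq.2 - pvAlt pq.1)) 0)

def pvTotal (runs : List (List (List (String × Int)))) : Int :=
  runs.foldl (fun acc run => acc + pvRunGain run) 0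

def elevation_gain_alt (points : List (List (String × Int))) : Int :=
  let s := points.foldl pvRunStep ([], [])
  match s.2 with
  | [] => pvTotal s.1
  | _ => pvTotal (s.1 ++ [s.2])

-- ===== PRECONDITION & SPEC =====
-- Pre_ excludes inputs where some point lacks the "altitude" key: Python A raises KeyError there.
def Pre_elevation_gain (points : List (List (String × Int))) : Prop :=
  ∀ p ∈ points, (p.lookup "altitude").isSome = true
instance (points : List (List (String × Int))) : Decidable (Pre_elevation_gain points) := by
  unfold Pre_elevation_gain; infer_instance

def pvWitness_elevation_gain : (List (List (String × Int))) :=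
  [[("altitude", 1)], [("altitude", 3)], [("altitude", 5)], [("altitude", 7)], [("altitude", 2)]]

def Spec_elevation_gain (points : List (List (String × Int))) (out : Int) : Prop := out = elevation_gain_alt points
instance (points : List (List (String × Int))) (out : Int) : Decidable (Spec_elevation_gain points out) := by unfold Spec_elevation_gain; infer_instance

-- ===== CLAIM (what is proved, stated in full; the proofs are below) =====
def Claim_equal_elevation_gain : Prop := ∀ (points : List (List (String × Int))), Dom_elevation_gain points → Pre_elevation_gain points → Spec_elevation_gain points (elevation_gain points)

-- ===== LEMMAS AND PROOFS =====

-- adjacent-pair sum on l (proof-side normal form of pvRunGain's inner fold)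
def pvSumAdj (l : List (List (String × Int))) : Int :=
  (l.zip l.tail).foldl (fun acc pq => acc + (pvAlt pq.2 - pvAlt pq.1)) 0

theorem pvRunGain_eq_sumAdj (run : List (List (String × Int))) :
    pvRunGain run = pvSumAdj (run.drop 2) := by
  simp [pvRunGain, pvSumAdj, PySem.List.slice_from_one,
    PySem.List.slice_from (a := 2) (by omega)]

theorem adj_append {α : Type} (d : List α) (p : α) :
    (d ++ [p]).zip ((d ++ [p]).tail)
      = d.zip d.tail ++ (match d.getLast? with | none => [] | some x => [(x, p)]) := by
  induction d with
  | nil => rfl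
  | cons a rest ih =>
    cases rest with
    | nil => rfl
    | cons b rest' =>
      simp only [List.cons_append, List.tail_cons, List.zip_cons_cons] at *
      rw [ih]
      simp [List.getLast?_cons_cons]

theorem pvSumAdj_append (d : List (List (String × Int))) (p : List (String × Int)) :
    pvSumAdj (d ++ [p])
      = pvSumAdj d + (match d.getLast? with | none => 0 | some x => pvAlt p - pvAlt x) := by
  unfold pvSumAdj
  rw [adj_append]
  cases h : d.getLast? with
  | none => simp
  | some x => simp [List.foldl_append]

theorem pvRunGain_small (run : List (List (String × Int))) (h : run.length ≤ 3) :
    pvRunGain run = 0 := by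
  rw [pvRunGain_eq_sumAdj]
  have : (run.drop 2).length ≤ 1 := by simp; omega
  unfold pvSumAdj
  match hd : run.drop 2 with
  | [] => rfl
  | [x] => rfl
  | x :: y :: t => rw [hd] at this; simp at this

theorem pvTotal_append (rs : List (List (List (String × Int)))) (r : List (List (String × Int))) :
    pvTotal (rs ++ [r]) = pvTotal rs + pvRunGain r := by
  unfold pvTotal
  rw [List.foldl_append]
  simp

-- finalization of B's loop state
def pvFin (s : List (List (List (String × Int))) × List (List (String × Int))) : Int :=
  match s.2 with
  | [] => pvTotal s.1
  | _ => pvTotal (s.1 ++ [s.2])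

theorem pvRunGain_append_big (cur : List (List (String × Int))) (p : List (String × Int))
    (h3 : 3 ≤ cur.length) :
    pvRunGain (cur ++ [p])
      = pvRunGain cur + (pvAlt p - pvAlt ((cur.getLast?).getD [])) := by
  rw [pvRunGain_eq_sumAdj, pvRunGain_eq_sumAdj,
    List.drop_append_of_le_length (by omega), pvSumAdj_append, List.getLast?_drop]
  rw [if_neg (by omega : ¬ cur.length ≤ 2)]
  cases h : cur.getLast? with
  | none =>
    rw [List.getLast?_eq_none_iff] at h
    subst h; simp at h3
  | some x => simp

-- the loop invariant: A's fold from the synchronized state equals B's finalized fold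
theorem pvLoop (rest : List (List (String × Int)))
    (runs : List (List (List (String × Int)))) (cur : List (List (String × Int))) (hc : cur ≠ []) :
    (rest.foldl pvStepA
        (pvTotal runs + pvRunGain cur,
         some (pvAlt (cur.getLast hc)),
         ((min (cur.length - 1) 2 : ℕ) : Int))).1
      = pvFin (rest.foldl pvRunStep (runs, cur)) := by
  induction rest generalizing runs cur with
  | nil =>
    simp [pvFin]
    cases cur with
    | nil => exact absurd rfl hc
    | cons a t => rw [pvTotal_append]
  | cons p rest ih =>
    have hlast : cur.getLast? = some (cur.getLast hc) := List.getLast?_eq_some_getLast hc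
    have hlen : 1 ≤ cur.length := List.length_pos_iff.mpr hc
    simp only [List.foldl_cons, pvStepA, pvRunStep, hlast]
    by_cases hup : pvAlt p > pvAlt (cur.getLast hc)
    · simp only [hup, if_pos]
      by_cases hsmall : cur.length ≤ 2
      · have hcond : ((min (cur.length - 1) 2 : ℕ) : Int) < 2 := by
          have : min (cur.length - 1) 2 = cur.length - 1 := by omega
          rw [this]; omega
        rw [if_pos hcond]
        have h1 : pvRunGain (cur ++ [p]) = pvRunGain cur := by
          rw [pvRunGain_small (cur ++ [p]) (by simp; omega),
              pvRunGain_small cur (by omega)]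
        have h2 : ((min ((cur ++ [p]).length - 1) 2 : ℕ) : Int)
            = ((min (cur.length - 1) 2 : ℕ) : Int) + 1 := by
          simp; omega
        have h3 : (cur ++ [p]).getLast (by simp) = p := List.getLast_append_singleton _
        have := ih runs (cur ++ [p]) (by simp)
        rw [h3, h1, h2] at this
        exact this
      · have hbig : 3 ≤ cur.length := by omega
        have hcond : ¬ ((min (cur.length - 1) 2 : ℕ) : Int) < 2 := by
          have : min (cur.length - 1) 2 = 2 := by omega
          rw [this]; omega
        rw [if_neg hcond]
        have h1 : pvRunGain (cur ++ [p])
            = pvRunGain cur + (pvAlt p - pvAlt (cur.getLast hc)) := by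
          rw [pvRunGain_append_big cur p hbig, hlast]; simp
        have h2 : ((min ((cur ++ [p]).length - 1) 2 : ℕ) : Int)
            = ((min (cur.length - 1) 2 : ℕ) : Int) := by
          simp; omega
        have h3 : (cur ++ [p]).getLast (by simp) = p := List.getLast_append_singleton _
        have hmin2 : min (cur.length - 1) 2 = 2 := by omega
        have := ih runs (cur ++ [p]) (by simp)
        rw [h3, h1, h2] at this
        have harr : pvTotal runs + (pvRunGain cur + (pvAlt p - pvAlt (cur.getLast hc)))
            = pvTotal runs + pvRunGain cur + (pvAlt p - pvAlt (cur.getLast hc)) := by ring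
        rw [harr] at this
        exact this
    · rw [if_neg hup, if_neg hup]
      have := ih (runs ++ [cur]) [p] (by simp)
      simp only [List.getLast_singleton, List.length_cons, List.length_nil] at this
      rw [pvTotal_append] at this
      simpa [pvRunGain_small [p] (by simp)] using this

-- ===== VERDICT (by name: the statement is the Claim_ definition above) =====
theorem elevation_gain_spec : Claim_equal_elevation_gain := by
  intro points _ _
  show elevation_gain points = elevation_gain_alt points
  cases points with
  | nil => rfl
  | cons p rest =>
    show (List.foldl pvStepA (pvStepA (0, none, 0) p) rest).1
        = elevation_gain_alt (p :: rest)
    have hstep : pvStepA (0, none, 0) p = (0, some (pvAlt p), 0) := rfl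
    have hB : elevation_gain_alt (p :: rest)
        = pvFin (rest.foldl pvRunStep ([], [p])) := by
      simp [elevation_gain_alt, pvRunStep, pvFin]
    rw [hstep, hB]
    have := pvLoop rest [] [p] (by simp)
    simpa [pvTotal, pvRunGain_small [p] (by simp)] using this
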